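-- pv_equiv track=rewrite | github.com/blzzua/codewars | 7-kyu/simple_fun_263_even_numbers_before_fixed.py | even_numbers_before_fixed
-- ===== SOURCE A (Python) =====
-- def even_numbers_before_fixed(sequence, fixed_element):
--     res = 0
--     for i in sequence:
--         if i == fixed_element:
--             return res
--         elif i % 2 == 0:
--             res += 1
--     else:
--         return -1
-- ===== SOURCE B (Python) =====
-- def even_numbers_before_fixed(sequence, fixed_element):
--     try:
--         idx = sequence.index(fixed_element)
--     except ValueError:
--         return -1
--     return sum(1 for x in sequence[:idx] if x % 2 == 0)
-- ===== Notes on version B (the rewrite author's own statement) =====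
-- stated objective: alternative
-- what changed: Replaces the fused scan-and-count loop by a locate-then-count pair: list.index finds the position (ValueError -> -1), then evens are counted in the prefix slice.
import Mathlib
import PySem

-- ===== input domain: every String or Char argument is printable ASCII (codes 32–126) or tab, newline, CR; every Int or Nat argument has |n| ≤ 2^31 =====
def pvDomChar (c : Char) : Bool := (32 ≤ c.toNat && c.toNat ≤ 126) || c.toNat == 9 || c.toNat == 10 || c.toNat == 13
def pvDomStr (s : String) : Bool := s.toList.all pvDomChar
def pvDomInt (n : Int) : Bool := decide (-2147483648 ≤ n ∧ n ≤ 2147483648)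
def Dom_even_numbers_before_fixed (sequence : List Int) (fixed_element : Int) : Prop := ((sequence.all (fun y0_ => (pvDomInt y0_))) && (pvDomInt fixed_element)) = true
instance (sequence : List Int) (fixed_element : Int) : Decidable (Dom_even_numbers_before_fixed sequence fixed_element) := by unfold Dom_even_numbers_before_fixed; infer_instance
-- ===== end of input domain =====

-- B replaces A's fused scan-and-count loop by a locate-then-count pair (index, then count evens in the prefix); objective: alternative decomposition.


-- ===== PORT A =====
-- A's single loop: return res at the first match, count evens along the way, -1 if never found.
def evenGoA (fixed_element : Int) : List Int → Int → Int
  | [], _ => -1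
  | i :: rest, res =>
    if i = fixed_element then res
    else if PySem.Int.mod i 2 = 0 then evenGoA fixed_element rest (res + 1)
    else evenGoA fixed_element rest res

def even_numbers_before_fixed (sequence : List Int) (fixed_element : Int) : Int :=
  evenGoA fixed_element sequence 0

-- ===== PORT B =====
-- B: sequence.index(fixed_element) (none = ValueError → -1), then count evens in sequence[:idx].
def even_numbers_before_fixed_alt (sequence : List Int) (fixed_element : Int) : Int :=
  match PySem.List.index? sequence fixed_element with
  | none => -1
  | some idx =>
      ((PySem.List.slice sequence none (some (idx : Int))).countP
        (fun x => PySem.Int.mod x 2 == 0) : Int)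

-- ===== PRECONDITION & SPEC =====
def Spec_even_numbers_before_fixed (sequence : List Int) (fixed_element : Int) (out : Int) : Prop := out = even_numbers_before_fixed_alt sequence fixed_element
instance (sequence : List Int) (fixed_element : Int) (out : Int) : Decidable (Spec_even_numbers_before_fixed sequence fixed_element out) := by unfold Spec_even_numbers_before_fixed; infer_instance

-- ===== CLAIM (what is proved, stated in full; the proofs are below) =====
def Claim_equal_even_numbers_before_fixed : Prop := ∀ (sequence : List Int) (fixed_element : Int), Dom_even_numbers_before_fixed sequence fixed_element → Spec_even_numbers_before_fixed sequence fixed_element (even_numbers_before_fixed sequence fixed_element)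

-- ===== LEMMAS AND PROOFS =====
theorem evenGoA_spec (f : Int) (seq : List Int) (res : Int) :
    evenGoA f seq res =
      match PySem.List.index? seq f with
      | none => -1
      | some idx => res + ((seq.take idx).countP (fun x => PySem.Int.mod x 2 == 0) : Int) := by
  induction seq generalizing res with
  | nil => simp [evenGoA, PySem.List.index?]
  | cons i rest ih =>
    by_cases hif : i = f
    · subst hif
      rw [PySem.List.index?_cons_self]
      simp [evenGoA]
    · rw [PySem.List.index?_cons_of_ne rest hif]
      simp only [evenGoA, if_neg hif]
      cases hidx : PySem.List.index? rest f with
      | none =>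
        split_ifs with he <;> rw [ih, hidx] <;> simp
      | some k =>
        have hcount : ((i :: rest).take (k + 1)).countP (fun x => PySem.Int.mod x 2 == 0)
            = ((if PySem.Int.mod i 2 == 0 then 1 else 0) : Nat)
              + (rest.take k).countP (fun x => PySem.Int.mod x 2 == 0) := by
          rw [List.take_succ_cons, List.countP_cons]
          split_ifs <;> omega
        split_ifs with he
        · have hb : (PySem.Int.mod i 2 == 0) = true := beq_iff_eq.mpr he
          rw [ih, hidx]
          simp only [Option.map_some, hcount, hb]
          simp only [if_true]
          push_cast
          ring
        · have hb : (PySem.Int.mod i 2 == 0) = false := beq_eq_false_iff_ne.mpr he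
          rw [ih, hidx]
          simp only [Option.map_some, hcount, hb]
          simp only [Bool.false_eq_true, if_false]
          push_cast
          ring

-- ===== VERDICT (by name: the statement is the Claim_ definition above) =====
theorem even_numbers_before_fixed_spec : Claim_equal_even_numbers_before_fixed := by
  intro sequence fixed_element _
  unfold Spec_even_numbers_before_fixed even_numbers_before_fixed even_numbers_before_fixed_alt
  rw [evenGoA_spec]
  cases h : PySem.List.index? sequence fixed_element with
  | none => rfl
  | some idx =>
    simp only [PySem.List.slice_to_natCast]
    simp
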